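-- pv_equiv track=rewrite | github.com/wen-zhi/PAT-Advanced-Level | Python/1056_mice_and_rice.py | mice_and_rice
-- ===== SOURCE A (Python) =====
-- def mice_and_rice(order, mouse, group_size):
--     n_player = len(order)
--     rounds = [0] * n_player
--     round = 1
--     while len(order) > 1:
--         winners = []
--         for i in range(0, len(order), group_size):
--             group = order[i:i+group_size]
--             winner = max(group, key=lambda x: mouse[x])
--             for player in group:
--                 if player != winner:
--                     rounds[player] = round
--             winners.append(winner)
--         round += 1
--         order = winners
--     rounds[order[0]] = round
--     players = list(range(n_player))
--     # sort by round
--     players.sort(key=lambda x: rounds[x], reverse=True)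
--     ranks = [None] * n_player
--     last_player = players[0]
--     ranks[last_player] = 1
--     for rank, player in enumerate(players, start=1):
--         if rounds[player] == rounds[last_player]:
--             ranks[player] = ranks[last_player]
--         else:
--             ranks[player] = rank
--             last_player = player
--     return ranks
-- ===== SOURCE B (Python) =====
-- def mice_and_rice(order, mouse, group_size):
--     n_player = len(order)
--
--     def play(cur, r):
--         # returns the list of (player, round-eliminated) assignments, winner last
--         if len(cur) <= 1:
--             return [(cur[0], r)]
--         pairs = []
--         winners = []
--         for i in range(0, len(cur), group_size):
--             g = cur[i:i+group_size]
--             w = g[0]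
--             for p in g[1:]:
--                 if mouse[p] > mouse[w]:
--                     w = p
--             winners.append(w)
--             pairs.extend((p, r) for p in g if p != w)
--         return pairs + play(winners, r + 1)
--
--     rounds = [0] * n_player
--     for p, r in play(order, 1):
--         rounds[p] = r
--
--     # competition rank = 1 + number of players surviving strictly more rounds,
--     # computed by counting (memoised per distinct round value) instead of sorting
--     memo = {}
--     ranks = []
--     for r in rounds:
--         if r not in memo:
--             memo[r] = 1 + len([q for q in rounds if q > r])
--         ranks.append(memo[r])
--     return ranks
-- ===== Notes on version B (the rewrite author's own statement) =====
-- stated objective: alternative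
-- what changed: The sort-and-tie-carry ranking pass is replaced by direct counting (rank = 1 + number of players eliminated in a strictly later round, memoised per distinct round value, no sort), and the tournament loop is restructured as a recursion that emits (player, elimination-round) pairs replayed into the rounds array.
import Mathlib
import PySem

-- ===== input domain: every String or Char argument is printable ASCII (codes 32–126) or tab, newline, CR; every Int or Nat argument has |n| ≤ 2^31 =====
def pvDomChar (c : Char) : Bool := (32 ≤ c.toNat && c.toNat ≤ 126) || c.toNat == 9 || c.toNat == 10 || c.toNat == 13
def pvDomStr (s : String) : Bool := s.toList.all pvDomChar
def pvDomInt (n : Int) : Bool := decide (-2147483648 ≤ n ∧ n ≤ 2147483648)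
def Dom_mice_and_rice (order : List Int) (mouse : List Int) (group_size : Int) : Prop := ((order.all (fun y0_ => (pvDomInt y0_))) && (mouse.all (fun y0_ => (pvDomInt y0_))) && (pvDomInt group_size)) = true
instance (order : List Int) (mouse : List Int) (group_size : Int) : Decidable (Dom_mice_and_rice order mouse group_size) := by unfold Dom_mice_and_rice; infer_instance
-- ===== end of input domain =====

-- B replaces A's sort-then-tie-carry ranking pass by direct counting (rank = 1 + number of
-- players surviving strictly more rounds, memoised per round value) and restructures the
-- tournament as a recursion producing elimination (player, round) pairs; same return value.

-- ===== PORT A =====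
-- one pass of A's `for i in range(0, len(order), group_size)` loop; state = (winners, rounds)
def miceRoundA (mouse : List Int) (group_size : Int) (round : Int) (order : List Int)
    (rounds : List Int) : List Int × List Int :=
  (PySem.List.pyRange 0 (order.length : Int) group_size).foldl
    (fun (st : List Int × List Int) i =>
      let group := PySem.List.slice order (some i) (some (i + group_size))
      -- Python's `max(group, key=…)` raises on an empty group; that is unreachable here,
      -- so the port totalises it with maxD's default
      let winner := PySem.List.maxD group (fun x => PySem.List.pyGetD mouse x 0) 0
      let rounds' := group.foldl
        (fun rs player => if player ≠ winner then PySem.List.pySetD rs player round else rs)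
        st.2
      (st.1 ++ [winner], rounds'))
    ([], rounds)

-- A's `while len(order) > 1` loop; fuel = initial len(order) always suffices (the length
-- strictly decreases each iteration on inputs admitted by Pre_)
def miceLoopA (mouse : List Int) (group_size : Int) :
    Nat → List Int → List Int → Int → List Int × List Int × Int
  | 0, order, rounds, round => (order, rounds, round)
  | fuel + 1, order, rounds, round =>
    if order.length ≤ 1 then (order, rounds, round)
    else
      let st := miceRoundA mouse group_size round order rounds
      miceLoopA mouse group_size fuel st.1 st.2 (round + 1)

def mice_and_rice (order : List Int) (mouse : List Int) (group_size : Int) : List Int :=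
  let n := order.length
  let t := miceLoopA mouse group_size n order (List.replicate n 0) 1
  let rounds := PySem.List.pySetD t.2.1 (PySem.List.pyGetD t.1 0 0) t.2.2
  let players := PySem.List.sorted (PySem.List.pyRange 0 (n : Int) 1)
      (fun x => PySem.List.pyGetD rounds x 0) true
  let last0 := PySem.List.pyGetD players 0 0
  -- `ranks = [None] * n_player`: every cell is overwritten before it is read or returned,
  -- so the placeholder is 0
  let ranks0 := PySem.List.pySetD (List.replicate n (0 : Int)) last0 1
  let res := (PySem.List.enumerate players 1).foldl
    (fun (st : List Int × Int) rp =>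
      if PySem.List.pyGetD rounds rp.2 0 = PySem.List.pyGetD rounds st.2 0 then
        (PySem.List.pySetD st.1 rp.2 (PySem.List.pyGetD st.1 st.2 0), st.2)
      else
        (PySem.List.pySetD st.1 rp.2 rp.1, rp.2))
    (ranks0, last0)
  res.1

-- ===== PORT B =====
-- B's recursive `play(cur, r)`: the list of (player, round-eliminated) pairs, winner last;
-- fuel = initial len(order) always suffices under Pre_ (unreachable fuel-0 base)
def micePlayB (mouse : List Int) (group_size : Int) :
    Nat → List Int → Int → List (Int × Int)
  | 0, cur, r => [(PySem.List.pyGetD cur 0 0, r)]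
  | fuel + 1, cur, r =>
    if cur.length ≤ 1 then [(PySem.List.pyGetD cur 0 0, r)]
    else
      let st := (PySem.List.pyRange 0 (cur.length : Int) group_size).foldl
        (fun (st : List (Int × Int) × List Int) i =>
          let g := PySem.List.slice cur (some i) (some (i + group_size))
          let w := (PySem.List.slice g (some 1) none).foldl
            (fun w p =>
              if PySem.List.pyGetD mouse w 0 < PySem.List.pyGetD mouse p 0 then p else w)
            (PySem.List.pyGetD g 0 0)
          (st.1 ++ (g.filter (fun p => p ≠ w)).map (fun p => (p, r)), st.2 ++ [w]))
        ([], [])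
      st.1 ++ micePlayB mouse group_size fuel st.2 (r + 1)

def mice_and_rice_alt (order : List Int) (mouse : List Int) (group_size : Int) : List Int :=
  let n := order.length
  let rounds := (micePlayB mouse group_size n order 1).foldl
    (fun rs pr => PySem.List.pySetD rs pr.1 pr.2) (List.replicate n (0 : Int))
  let res := rounds.foldl
    (fun (st : PySem.Dict Int Int × List Int) r =>
      let memo := if st.1.contains r then st.1
        else st.1.insert r (1 + ((rounds.filter (fun q => decide (r < q))).length : Int))
      (memo, st.2 ++ [memo.getD r 0]))
    (PySem.Dict.empty, [])
  res.2

-- ===== PRECONDITION & SPEC =====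
-- Exactly the inputs where Python A returns: a nonempty order (else `order[0]` raises
-- IndexError), a group size ≥ 2 unless there is a single player (group_size ≤ 0 raises in
-- `range`/`order[0]`, group_size = 1 loops forever), every listed player a valid index into
-- `rounds` (length = len(order)), and — when a round is actually played — into `mouse`.
def Pre_mice_and_rice (order : List Int) (mouse : List Int) (group_size : Int) : Prop :=
  order ≠ [] ∧ (order.length ≤ 1 ∨ 2 ≤ group_size) ∧
  (∀ p ∈ order, PySem.Raise.InRange order.length p) ∧
  (1 < order.length → ∀ p ∈ order, PySem.Raise.InRange mouse.length p)
instance (order : List Int) (mouse : List Int) (group_size : Int) : Decidable (Pre_mice_and_rice order mouse group_size) := by unfold Pre_mice_and_rice; infer_instance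

def pvWitness_mice_and_rice : List Int × List Int × Int := ([1, 0, 2], [5, 3, 7], 2)

def Spec_mice_and_rice (order : List Int) (mouse : List Int) (group_size : Int) (out : List Int) : Prop := out = mice_and_rice_alt order mouse group_size
instance (order : List Int) (mouse : List Int) (group_size : Int) (out : List Int) : Decidable (Spec_mice_and_rice order mouse group_size out) := by unfold Spec_mice_and_rice; infer_instance

-- ===== CLAIM (what is proved, stated in full; the proofs are below) =====
def Claim_equal_mice_and_rice : Prop := ∀ (order : List Int) (mouse : List Int) (group_size : Int), Dom_mice_and_rice order mouse group_size → Pre_mice_and_rice order mouse group_size → Spec_mice_and_rice order mouse group_size (mice_and_rice order mouse group_size)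

-- ===== LEMMAS AND PROOFS =====

-- pyGetD after pySetD at Int indices known to be in range
lemma pySetGet (xs : List Int) (i j : Int) (v d : Int) (hi0 : 0 ≤ i) (_hi : i < (xs.length : Int))
    (hj0 : 0 ≤ j) (hj : j < (xs.length : Int)) :
    PySem.List.pyGetD (PySem.List.pySetD xs i v) j d = if j = i then v else PySem.List.pyGetD xs j d := by
  rw [PySem.List.pySetD_of_nonneg xs v hi0]
  rw [PySem.List.pyGetD_eq_getElem _ d hj0 (by simpa using hj)]
  rw [List.getElem_set]
  split_ifs with h1 h2 h2
  · rfl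
  · exact absurd (by omega : j = i) h2
  · exact absurd (by omega : i.toNat = j.toNat) h1
  · rw [PySem.List.pyGetD_eq_getElem _ d hj0 hj]

-- replaying a pair list with pySetD preserves length
lemma length_foldl_pySetD (l : List (Int × Int)) (rs : List Int) :
    (l.foldl (fun rs pr => PySem.List.pySetD rs pr.1 pr.2) rs).length = rs.length := by
  induction l generalizing rs with
  | nil => rfl
  | cons pr l ih => simp [List.foldl_cons, ih, PySem.List.length_pySetD]

-- Python's first-maximum `max(g, key)` is B's strict-`<` running scan
lemma argmax_eq (key : Int → Int) (x : Int) (t : List Int) :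
    PySem.List.maxD (x :: t) key 0
      = t.foldl (fun w p => if key w < key p then p else w) x := by
  induction t generalizing x with
  | nil => rfl
  | cons p t ih =>
    have h1 : PySem.List.maxD (x :: p :: t) key 0
        = PySem.List.maxD ((if key x < key p then p else x) :: t) key 0 := by
      simp only [PySem.List.maxD, PySem.List.max?, List.foldl_cons]
      by_cases h : key x < key p <;> simp [h]
    rw [h1, ih]
    simp only [List.foldl_cons]

-- A's in-place loser marking is replaying B's (player, round) pairs for the same group
lemma mark_losers_eq (g : List Int) (w round : Int) (rs : List Int) :
    g.foldl (fun rs p => if p ≠ w then PySem.List.pySetD rs p round else rs) rs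
      = ((g.filter (fun p => p ≠ w)).map (fun p => (p, round))).foldl
          (fun rs pr => PySem.List.pySetD rs pr.1 pr.2) rs := by
  induction g generalizing rs with
  | nil => rfl
  | cons p g ih =>
    simp only [List.foldl_cons, List.filter_cons]
    by_cases h : p = w
    · rw [if_neg (by simp [h] : ¬ (p ≠ w))]
      rw [show (decide (p ≠ w)) = false by simp [h]]
      simpa using ih rs
    · rw [if_pos h]
      rw [show (decide (p ≠ w)) = true by simp [h]]
      simpa using ih (PySem.List.pySetD rs p round)


-- B's per-round fold accumulates its pair/winner lists independently of the start state
lemma pairsFactor (mouse : List Int) (group_size r : Int) (cur : List Int) :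
    ∀ (L : List Int) (p0 : List (Int × Int)) (w0 : List Int),
    L.foldl
      (fun (st : List (Int × Int) × List Int) i =>
        let g := PySem.List.slice cur (some i) (some (i + group_size))
        let w := (PySem.List.slice g (some 1) none).foldl
          (fun w p =>
            if PySem.List.pyGetD mouse w 0 < PySem.List.pyGetD mouse p 0 then p else w)
          (PySem.List.pyGetD g 0 0)
        (st.1 ++ (g.filter (fun p => p ≠ w)).map (fun p => (p, r)), st.2 ++ [w]))
      (p0, w0)
    = (p0 ++ (L.foldl
      (fun (st : List (Int × Int) × List Int) i =>
        let g := PySem.List.slice cur (some i) (some (i + group_size))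
        let w := (PySem.List.slice g (some 1) none).foldl
          (fun w p =>
            if PySem.List.pyGetD mouse w 0 < PySem.List.pyGetD mouse p 0 then p else w)
          (PySem.List.pyGetD g 0 0)
        (st.1 ++ (g.filter (fun p => p ≠ w)).map (fun p => (p, r)), st.2 ++ [w]))
      ([], w0)).1,
      (L.foldl
      (fun (st : List (Int × Int) × List Int) i =>
        let g := PySem.List.slice cur (some i) (some (i + group_size))
        let w := (PySem.List.slice g (some 1) none).foldl
          (fun w p =>
            if PySem.List.pyGetD mouse w 0 < PySem.List.pyGetD mouse p 0 then p else w)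
          (PySem.List.pyGetD g 0 0)
        (st.1 ++ (g.filter (fun p => p ≠ w)).map (fun p => (p, r)), st.2 ++ [w]))
      ([], w0)).2) := by
  intro L
  induction L with
  | nil => intro p0 w0; simp
  | cons i L ih =>
    intro p0 w0
    simp only [List.foldl_cons]
    conv_lhs => rw [ih]
    conv_rhs => rw [ih]
    simp [List.append_assoc]

-- groups cut by valid range indices are nonempty
lemma slice_ne_nil (cur : List Int) (i group_size : Int) (h0 : 0 ≤ i)
    (h1 : i < (cur.length : Int)) (hg : 1 ≤ group_size) :
    PySem.List.slice cur (some i) (some (i + group_size)) ≠ [] := by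
  rw [PySem.List.slice_toNat cur h0 (by omega)]
  intro hnil
  have h2 : i.toNat < cur.length := by omega
  have h3 : 1 ≤ (i + group_size).toNat - i.toNat := by omega
  have := congrArg List.length hnil
  simp [List.length_take, List.length_drop] at this
  omega

-- one tournament round: A's (winners, in-place rounds) fold equals B's (pairs, winners)
-- fold with the pairs replayed onto the same rounds list
lemma roundRel (mouse : List Int) (group_size r : Int) (cur : List Int) :
    ∀ (L : List Int) (w0 : List Int) (rs : List Int),
    (∀ i ∈ L, 0 ≤ i ∧ i < (cur.length : Int)) → 1 ≤ group_size →
    L.foldl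
      (fun (st : List Int × List Int) i =>
        let group := PySem.List.slice cur (some i) (some (i + group_size))
        let winner := PySem.List.maxD group (fun x => PySem.List.pyGetD mouse x 0) 0
        let rounds' := group.foldl
          (fun rs player => if player ≠ winner then PySem.List.pySetD rs player r else rs)
          st.2
        (st.1 ++ [winner], rounds'))
      (w0, rs)
    = ((L.foldl
        (fun (st : List (Int × Int) × List Int) i =>
          let g := PySem.List.slice cur (some i) (some (i + group_size))
          let w := (PySem.List.slice g (some 1) none).foldl
            (fun w p =>
              if PySem.List.pyGetD mouse w 0 < PySem.List.pyGetD mouse p 0 then p else w)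
            (PySem.List.pyGetD g 0 0)
          (st.1 ++ (g.filter (fun p => p ≠ w)).map (fun p => (p, r)), st.2 ++ [w]))
        ([], w0)).2,
       ((L.foldl
        (fun (st : List (Int × Int) × List Int) i =>
          let g := PySem.List.slice cur (some i) (some (i + group_size))
          let w := (PySem.List.slice g (some 1) none).foldl
            (fun w p =>
              if PySem.List.pyGetD mouse w 0 < PySem.List.pyGetD mouse p 0 then p else w)
            (PySem.List.pyGetD g 0 0)
          (st.1 ++ (g.filter (fun p => p ≠ w)).map (fun p => (p, r)), st.2 ++ [w]))
        ([], w0)).1).foldl (fun rs pr => PySem.List.pySetD rs pr.1 pr.2) rs) := by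
  intro L
  induction L with
  | nil => intro w0 rs _ _; rfl
  | cons i L ih =>
    intro w0 rs hmem hg
    obtain ⟨hi0, hi1⟩ := hmem i (by simp)
    obtain ⟨x, t, hxt⟩ : ∃ x t,
        PySem.List.slice cur (some i) (some (i + group_size)) = x :: t := by
      cases h : PySem.List.slice cur (some i) (some (i + group_size)) with
      | nil => exact absurd h (slice_ne_nil cur i group_size hi0 hi1 hg)
      | cons x t => exact ⟨x, t, rfl⟩
    have hw : PySem.List.maxD (PySem.List.slice cur (some i) (some (i + group_size)))
          (fun x => PySem.List.pyGetD mouse x 0) 0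
        = (PySem.List.slice (PySem.List.slice cur (some i) (some (i + group_size)))
            (some 1) none).foldl
            (fun w p =>
              if PySem.List.pyGetD mouse w 0 < PySem.List.pyGetD mouse p 0 then p else w)
            (PySem.List.pyGetD (PySem.List.slice cur (some i) (some (i + group_size))) 0 0) := by
      rw [hxt, PySem.List.slice_from_one, PySem.List.pyGetD_zero_cons]
      exact argmax_eq _ x t
    simp only [List.foldl_cons]
    rw [hw, mark_losers_eq]
    rw [ih _ _ (fun j hj => hmem j (by simp [hj])) hg]
    conv_rhs => rw [pairsFactor mouse group_size r cur L]
    simp only [List.nil_append]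
    rw [List.foldl_append]

-- the whole tournament: A's loop plus its final winner write equals replaying B's pairs
lemma simRel (mouse : List Int) (group_size : Int) :
    ∀ (fuel : Nat) (cur rs : List Int) (r : Int),
    (1 ≤ group_size ∨ cur.length ≤ 1) →
    PySem.List.pySetD (miceLoopA mouse group_size fuel cur rs r).2.1
        (PySem.List.pyGetD (miceLoopA mouse group_size fuel cur rs r).1 0 0)
        (miceLoopA mouse group_size fuel cur rs r).2.2
      = (micePlayB mouse group_size fuel cur r).foldl
          (fun rs pr => PySem.List.pySetD rs pr.1 pr.2) rs := by
  intro fuel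
  induction fuel with
  | zero => intro cur rs r _; rfl
  | succ fuel IH =>
    intro cur rs r h
    by_cases hlen : cur.length ≤ 1
    · simp only [miceLoopA, micePlayB, if_pos hlen]
      rfl
    · have hg : 1 ≤ group_size := by
        rcases h with h | h
        · omega
        · exact absurd h hlen
      have hmem : ∀ i ∈ PySem.List.pyRange 0 (cur.length : Int) group_size,
          0 ≤ i ∧ i < (cur.length : Int) := by
        intro i hi
        have := (PySem.List.mem_pyRange_iff_of_pos (by omega) i).mp hi
        exact ⟨this.1, this.2.1⟩
      simp only [miceLoopA, micePlayB, if_neg hlen]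
      simp only [miceRoundA]
      rw [roundRel mouse group_size r cur _ _ _ hmem hg]
      rw [List.foldl_append]
      exact IH _ _ _ (Or.inl hg)

-- A's walk down the sorted players assigns each player 1 + (number of players with a
-- strictly larger key) — competition ranking without the sort
lemma walk_aux (key : Int → Int) (n : Nat) (s : List Int)
    (hperm : s.Perm (PySem.List.pyRange 0 (n : Int) 1))
    (hsort : s.Pairwise (fun a b => key b ≤ key a)) :
    ∀ (suf pre ranks : List Int) (last : Int),
    s = pre ++ suf →
    ranks.length = n →
    last ∈ pre →
    (∀ q ∈ pre, key last ≤ key q) →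
    (∀ q ∈ pre, PySem.List.pyGetD ranks q 0
        = 1 + (List.countP (fun x => decide (key q < key x)) s : Int)) →
    ((((PySem.List.enumerate suf (1 + (pre.length : Int))).foldl
        (fun (st : List Int × Int) rp =>
          if key rp.2 = key st.2 then
            (PySem.List.pySetD st.1 rp.2 (PySem.List.pyGetD st.1 st.2 0), st.2)
          else
            (PySem.List.pySetD st.1 rp.2 rp.1, rp.2)) (ranks, last)).1.length = n)
      ∧ ∀ q ∈ s, PySem.List.pyGetD ((PySem.List.enumerate suf (1 + (pre.length : Int))).foldl
        (fun (st : List Int × Int) rp =>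
          if key rp.2 = key st.2 then
            (PySem.List.pySetD st.1 rp.2 (PySem.List.pyGetD st.1 st.2 0), st.2)
          else
            (PySem.List.pySetD st.1 rp.2 rp.1, rp.2)) (ranks, last)).1 q 0
        = 1 + (List.countP (fun x => decide (key q < key x)) s : Int)) := by
  have hbound : ∀ q ∈ s, 0 ≤ q ∧ q < (n : Int) := by
    intro q hq
    have := PySem.List.mem_pyRange_one.mp (hperm.mem_iff.mp hq)
    omega
  have hnodup : s.Nodup := hperm.nodup_iff.mpr (PySem.List.nodup_pyRange_one _ _)
  intro suf
  induction suf with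
  | nil =>
    intro pre ranks last hs hlen hlast hmin hranks
    simp only [PySem.List.enumerate_nil, List.foldl_nil]
    refine ⟨hlen, ?_⟩
    intro q hq
    have hq' : q ∈ pre := by
      rw [hs, List.append_nil] at hq
      exact hq
    exact hranks q hq'
  | cons player suf ih =>
    intro pre ranks last hs hlen hlast hmin hranks
    simp only [PySem.List.enumerate_cons, List.foldl_cons]
    have hplayer_s : player ∈ s := by rw [hs]; simp
    have hlast_s : last ∈ s := by rw [hs]; exact List.mem_append_left _ hlast
    obtain ⟨hp0, hp1⟩ := hbound player hplayer_s
    have hsplit := List.pairwise_append.mp (by rw [← hs]; exact hsort)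
    have hcross : ∀ a ∈ pre, key player ≤ key a := by
      intro a ha
      exact hsplit.2.2 a ha player (by simp)
    have hplayer_notin_pre : player ∉ pre := by
      have := hnodup
      rw [hs] at this
      intro hmem
      exact (List.disjoint_of_nodup_append this) hmem (by simp)
    have hidx : (1 : Int) + (pre.length : Int) + 1 = 1 + (((pre ++ [player]).length : Int)) := by
      simp only [List.length_append, List.length_singleton]
      push_cast
      omega
    have hG_eq_of_key : ∀ a b : Int, key a = key b →
        (1 + (List.countP (fun x => decide (key a < key x)) s : Int))
          = 1 + (List.countP (fun x => decide (key b < key x)) s : Int) := by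
      intro a b hab
      rw [hab]
    by_cases hk : key player = key last
    · rw [if_pos hk]
      have hranks' : ∀ q ∈ pre ++ [player],
          PySem.List.pyGetD (PySem.List.pySetD ranks player (PySem.List.pyGetD ranks last 0)) q 0
            = 1 + (List.countP (fun x => decide (key q < key x)) s : Int) := by
        intro q hq
        obtain ⟨hq0, hq1⟩ := hbound q (by rw [hs]; rcases List.mem_append.mp hq with h | h
                                          · exact List.mem_append_left _ h
                                          · simp at h; simp [h])
        rw [pySetGet ranks player q _ 0 hp0 (by rw [hlen]; exact hp1) hq0 (by rw [hlen]; exact hq1)]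
        rcases List.mem_append.mp hq with h | h
        · rw [if_neg (by rintro rfl; exact hplayer_notin_pre h)]
          exact hranks q h
        · simp only [List.mem_singleton] at h
          subst h
          rw [if_pos rfl, hranks last hlast]
          exact (hG_eq_of_key q last hk).symm
      have H := ih (pre ++ [player]) _ last
        (by rw [hs, List.append_assoc]; rfl)
        (by rw [PySem.List.length_pySetD]; exact hlen)
        (List.mem_append_left _ hlast)
        (by intro q hq
            rcases List.mem_append.mp hq with h | h
            · exact hmin q h
            · simp only [List.mem_singleton] at h
              subst h
              exact le_of_eq hk.symm)
        hranks'
      rw [hidx]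
      exact H
    · rw [if_neg hk]
      have hlt_pre : ∀ q ∈ pre, key player < key q := by
        intro q hq
        have h1 : key player ≤ key last := hcross last hlast
        have h2 : key player < key last := lt_of_le_of_ne h1 hk
        exact lt_of_lt_of_le h2 (hmin q hq)
      have hcount : (List.countP (fun x => decide (key player < key x)) s : Int)
          = (pre.length : Int) := by
        rw [hs, List.countP_append]
        have h1 : List.countP (fun x => decide (key player < key x)) pre = pre.length :=
          List.countP_eq_length.mpr (fun a ha => by simpa using hlt_pre a ha)
        have h2 : List.countP (fun x => decide (key player < key x)) (player :: suf) = 0 := by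
          refine List.countP_eq_zero.mpr ?_
          intro a ha
          simp only [decide_eq_true_eq]
          rcases List.mem_cons.mp ha with h | h
          · subst h; exact lt_irrefl _
          · have := (List.pairwise_cons.mp hsplit.2.1).1 a h
            omega
        rw [h1, h2]
        push_cast
        ring
      have hGplayer : (1 : Int) + (pre.length : Int)
          = 1 + (List.countP (fun x => decide (key player < key x)) s : Int) := by
        rw [hcount]
      have hranks' : ∀ q ∈ pre ++ [player],
          PySem.List.pyGetD (PySem.List.pySetD ranks player (1 + (pre.length : Int))) q 0
            = 1 + (List.countP (fun x => decide (key q < key x)) s : Int) := by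
        intro q hq
        obtain ⟨hq0, hq1⟩ := hbound q (by rw [hs]; rcases List.mem_append.mp hq with h | h
                                          · exact List.mem_append_left _ h
                                          · simp at h; simp [h])
        rw [pySetGet ranks player q _ 0 hp0 (by rw [hlen]; exact hp1) hq0 (by rw [hlen]; exact hq1)]
        rcases List.mem_append.mp hq with h | h
        · rw [if_neg (by rintro rfl; exact hplayer_notin_pre h)]
          exact hranks q h
        · simp only [List.mem_singleton] at h
          subst h
          rw [if_pos rfl]
          exact hGplayer
      have H := ih (pre ++ [player]) _ player
        (by rw [hs, List.append_assoc]; rfl)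
        (by rw [PySem.List.length_pySetD]; exact hlen)
        (by simp)
        (by intro q hq
            rcases List.mem_append.mp hq with h | h
            · exact le_of_lt (hlt_pre q h)
            · simp only [List.mem_singleton] at h
              subst h
              exact le_refl _)
        hranks'
      rw [hidx]
      exact H

-- B's memoised counting loop is the pointwise map of the counting function
lemma memo_map (rounds : List Int) (g : Int → Int)
    (hg : ∀ r : Int, g r = 1 + ((rounds.filter (fun q => decide (r < q))).length : Int)) :
    ∀ (l : List Int) (memo : PySem.Dict Int Int) (acc : List Int),
    (∀ k v, memo.get? k = some v → v = g k) →
    (l.foldl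
      (fun (st : PySem.Dict Int Int × List Int) r =>
        let memo := if st.1.contains r then st.1
          else st.1.insert r (1 + ((rounds.filter (fun q => decide (r < q))).length : Int))
        (memo, st.2 ++ [memo.getD r 0]))
      (memo, acc)).2 = acc ++ l.map g := by
  intro l
  induction l with
  | nil => intro memo acc _; simp
  | cons r l ih =>
    intro memo acc hinv
    simp only [List.foldl_cons]
    by_cases hc : memo.contains r
    · rw [if_pos hc]
      have hv : memo.getD r 0 = g r := by
        obtain ⟨v, hvv⟩ : ∃ v, memo.get? r = some v := by
          refine Option.isSome_iff_exists.mp ?_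
          rw [← PySem.Dict.contains_eq_isSome_get?]
          exact hc
        rw [PySem.Dict.getD_eq_get?_getD, hvv]
        exact hinv r v hvv
      rw [hv, ih memo (acc ++ [g r]) hinv]
      simp
    · rw [if_neg hc]
      have hins : (memo.insert r
          (1 + ((rounds.filter (fun q => decide (r < q))).length : Int))).getD r 0 = g r := by
        rw [PySem.Dict.getD_insert_self]
        exact (hg r).symm
      have hinv' : ∀ k v, (memo.insert r
          (1 + ((rounds.filter (fun q => decide (r < q))).length : Int))).get? k = some v →
          v = g k := by
        intro k v hkv
        rw [PySem.Dict.get?_insert] at hkv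
        by_cases hk : k = r
        · rw [if_pos hk] at hkv
          cases hkv
          rw [hk]
          exact (hg r).symm
        · rw [if_neg hk] at hkv
          exact hinv k v hkv
      rw [hins, ih _ (acc ++ [g r]) hinv']
      simp

-- A's whole ranking phase equals B's whole memoised-counting phase, for any rounds list
lemma rank_eq (n : Nat) (hn : 0 < n) (rounds : List Int) (hlen : rounds.length = n) :
    ((PySem.List.enumerate (PySem.List.sorted (PySem.List.pyRange 0 (n : Int) 1)
          (fun x => PySem.List.pyGetD rounds x 0) true) 1).foldl
      (fun (st : List Int × Int) rp =>
        if PySem.List.pyGetD rounds rp.2 0 = PySem.List.pyGetD rounds st.2 0 then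
          (PySem.List.pySetD st.1 rp.2 (PySem.List.pyGetD st.1 st.2 0), st.2)
        else
          (PySem.List.pySetD st.1 rp.2 rp.1, rp.2))
      (PySem.List.pySetD (List.replicate n (0 : Int))
        (PySem.List.pyGetD (PySem.List.sorted (PySem.List.pyRange 0 (n : Int) 1)
          (fun x => PySem.List.pyGetD rounds x 0) true) 0 0) 1,
       PySem.List.pyGetD (PySem.List.sorted (PySem.List.pyRange 0 (n : Int) 1)
          (fun x => PySem.List.pyGetD rounds x 0) true) 0 0)).1
    = (rounds.foldl
        (fun (st : PySem.Dict Int Int × List Int) r =>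
          let memo := if st.1.contains r then st.1
            else st.1.insert r (1 + ((rounds.filter (fun q => decide (r < q))).length : Int))
          (memo, st.2 ++ [memo.getD r 0]))
        (PySem.Dict.empty, [])).2 := by
  have hB := memo_map rounds
      (fun v => 1 + ((rounds.filter (fun q => decide (v < q))).length : Int))
      (fun r => rfl) rounds PySem.Dict.empty []
      (by intro k v hkv; rw [PySem.Dict.get?_empty] at hkv; cases hkv)
  rw [hB, List.nil_append]
  obtain ⟨p0, t, hct⟩ : ∃ p0 t, PySem.List.sorted (PySem.List.pyRange 0 (n : Int) 1)
      (fun x => PySem.List.pyGetD rounds x 0) true = p0 :: t := by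
    cases h : PySem.List.sorted (PySem.List.pyRange 0 (n : Int) 1)
        (fun x => PySem.List.pyGetD rounds x 0) true with
    | nil =>
      exfalso
      rw [PySem.List.sorted_eq_nil_iff] at h
      have := congrArg List.length h
      rw [PySem.List.length_pyRange_one] at this
      simp at this
      omega
    | cons a b => exact ⟨a, b, rfl⟩
  have hperm := PySem.List.sorted_perm (PySem.List.pyRange 0 (n : Int) 1)
      (fun x => PySem.List.pyGetD rounds x 0) true
  have hsort := PySem.List.sorted_pairwise_rev (PySem.List.pyRange 0 (n : Int) 1)
      (fun x => PySem.List.pyGetD rounds x 0)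
  have hp0mem : p0 ∈ PySem.List.sorted (PySem.List.pyRange 0 (n : Int) 1)
      (fun x => PySem.List.pyGetD rounds x 0) true := by rw [hct]; simp
  obtain ⟨hp00, hp01⟩ : 0 ≤ p0 ∧ p0 < (n : Int) := by
    have := PySem.List.mem_pyRange_one.mp (hperm.mem_iff.mp hp0mem)
    omega
  have hmax := PySem.List.key_head_sorted_rev_ge (PySem.List.pyRange 0 (n : Int) 1)
      (fun x => PySem.List.pyGetD rounds x 0) hct
  have hG0 : PySem.List.pyGetD (PySem.List.pySetD (List.replicate n (0 : Int)) p0 1) p0 0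
      = 1 + (List.countP (fun x => decide (PySem.List.pyGetD rounds p0 0 < PySem.List.pyGetD rounds x 0))
          (PySem.List.sorted (PySem.List.pyRange 0 (n : Int) 1)
            (fun x => PySem.List.pyGetD rounds x 0) true) : Int) := by
    have hcount : List.countP (fun x => decide (PySem.List.pyGetD rounds p0 0 < PySem.List.pyGetD rounds x 0))
        (PySem.List.sorted (PySem.List.pyRange 0 (n : Int) 1)
          (fun x => PySem.List.pyGetD rounds x 0) true) = 0 := by
      refine List.countP_eq_zero.mpr ?_
      intro a ha
      have hle := hmax a (hperm.mem_iff.mp ha)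
      simp only [] at hle
      simp only [decide_eq_true_eq]
      omega
    rw [hcount]
    rw [pySetGet _ _ _ _ _ hp00 (by simp; omega) hp00 (by simp; omega)]
    simp
  have H := walk_aux (fun x => PySem.List.pyGetD rounds x 0) n
      (PySem.List.sorted (PySem.List.pyRange 0 (n : Int) 1)
        (fun x => PySem.List.pyGetD rounds x 0) true) hperm hsort
      t [p0] (PySem.List.pySetD (List.replicate n (0 : Int)) p0 1) p0
      (by rw [hct]; rfl)
      (by rw [PySem.List.length_pySetD]; simp)
      (by simp)
      (by intro q hq; simp at hq; subst hq; exact le_refl _)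
      (by intro q hq; simp at hq; subst hq; exact hG0)
  -- unfold the first step of A's walk: the head player always takes the equal-keys branch
  rw [hct, PySem.List.enumerate_cons, List.foldl_cons]
  simp only [PySem.List.pyGetD_zero_cons]
  simp only [if_true]
  -- the state after the first step is exactly walk_aux's initial state for pre = [p0]
  have hG0' : PySem.List.pyGetD (PySem.List.pySetD (List.replicate n (0 : Int)) p0 1) p0 0 = 1 := by
    rw [pySetGet _ _ _ _ _ hp00 (by simp; omega) hp00 (by simp; omega)]
    simp
  rw [hG0']
  have hset2 : PySem.List.pySetD (PySem.List.pySetD (List.replicate n (0 : Int)) p0 1) p0 1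
      = PySem.List.pySetD (List.replicate n (0 : Int)) p0 1 := by
    rw [PySem.List.pySetD_of_nonneg _ _ hp00, PySem.List.pySetD_of_nonneg _ _ hp00]
    simp [List.set_set]
  rw [hset2]
  have hidx2 : (1 : Int) + 1 = 1 + (([p0] : List Int).length : Int) := by simp
  rw [hidx2]
  -- conclude by pointwise comparison
  apply List.ext_getElem
  · rw [H.1]
    rw [List.length_map, hlen]
  · intro k h1 h2
    have hk : k < n := by
      rw [H.1] at h1
      exact h1
    have hkmem : ((k : Int)) ∈ PySem.List.sorted (PySem.List.pyRange 0 (n : Int) 1)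
        (fun x => PySem.List.pyGetD rounds x 0) true := by
      rw [hct] at hperm ⊢
      refine hperm.mem_iff.mpr ?_
      refine PySem.List.mem_pyRange_one.mpr ?_
      omega
    have hv := H.2 (k : Int) (by rw [hct] at hkmem ⊢; exact hkmem)
    rw [PySem.List.pyGetD_natCast, List.getD_eq_getElem?_getD, List.getElem?_eq_getElem h1,
        Option.getD_some] at hv
    rw [hct] at hv
    rw [hv]
    beta_reduce
    -- right-hand side entry
    rw [List.getElem_map]
    have hkey : PySem.List.pyGetD rounds (k : Int) 0 = rounds[k]'(by omega) := by
      rw [PySem.List.pyGetD_natCast, List.getD_eq_getElem?_getD,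
          List.getElem?_eq_getElem (by omega : k < rounds.length), Option.getD_some]
    rw [hkey]
    -- counting over the sorted players equals counting over rounds itself
    have hcnt : ∀ v : Int,
        List.countP (fun x => decide (v < PySem.List.pyGetD rounds x 0)) (p0 :: t)
          = List.countP (fun q => decide (v < q)) rounds := by
      intro v
      have hpc := List.Perm.countP_eq
          (fun x => decide (v < PySem.List.pyGetD rounds x 0)) (hct ▸ hperm)
      rw [hpc]
      conv_rhs => rw [← PySem.List.map_pyGetD_pyRange_zero' rounds 0]
      rw [List.countP_map]
      have h2 : ((rounds.length : Int)) = ((n : Int)) := by rw [hlen]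
      rw [h2]
      rfl
    rw [hcnt]
    rw [List.countP_eq_length_filter]

theorem mice_and_rice_spec : Claim_equal_mice_and_rice := by
  intro order mouse group_size _ hpre
  obtain ⟨hne, hgs, _⟩ := hpre
  show mice_and_rice order mouse group_size = mice_and_rice_alt order mouse group_size
  have hor : 1 ≤ group_size ∨ order.length ≤ 1 := by
    rcases hgs with h | h
    · exact Or.inr h
    · exact Or.inl (by omega)
  have hn : 0 < order.length := List.length_pos_iff.mpr hne
  have hsim := simRel mouse group_size order.length order
      (List.replicate order.length (0 : Int)) 1 hor
  have hlenB : ((micePlayB mouse group_size order.length order 1).foldl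
      (fun rs pr => PySem.List.pySetD rs pr.1 pr.2)
      (List.replicate order.length (0 : Int))).length = order.length := by
    rw [length_foldl_pySetD]
    simp
  have hrank := rank_eq order.length hn _ hlenB
  simp only [mice_and_rice, mice_and_rice_alt]
  rw [hsim]
  exact hrank
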